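-- pv_equiv track=rewrite | github.com/maxwellwang/Colorization | util.py | pick_color
-- ===== SOURCE A (Python) =====
-- def pick_color(counts, tiebreaker):
--     max_count = max(counts.values())
--     max_found = False
--     best_color = None
--     for color in counts:
--         count = counts[color]
--         if count == max_count:
--             if max_found:
--                 return tiebreaker
--             else:
--                 max_found = True
--                 best_color = color
--     return list(best_color)
-- ===== SOURCE B (Python) =====
-- def pick_color(counts, tiebreaker):
--     values = list(counts.values())
--     mx = max(values)
--     if values.count(mx) > 1:
--         return tiebreaker
--     for color, cnt in counts.items():
--         if cnt == mx:
--             return list(color)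
-- ===== Notes on version B (the rewrite author's own statement) =====
-- stated objective: simpler
-- what changed: Replaces A's single flag-tracking scan (max_found/best_color state machine with mid-loop return) by three stateless steps: take the max of the values, count how many values attain it (>1 means return tiebreaker verbatim), otherwise locate the first entry with that value and return its key as a list.
import Mathlib
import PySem

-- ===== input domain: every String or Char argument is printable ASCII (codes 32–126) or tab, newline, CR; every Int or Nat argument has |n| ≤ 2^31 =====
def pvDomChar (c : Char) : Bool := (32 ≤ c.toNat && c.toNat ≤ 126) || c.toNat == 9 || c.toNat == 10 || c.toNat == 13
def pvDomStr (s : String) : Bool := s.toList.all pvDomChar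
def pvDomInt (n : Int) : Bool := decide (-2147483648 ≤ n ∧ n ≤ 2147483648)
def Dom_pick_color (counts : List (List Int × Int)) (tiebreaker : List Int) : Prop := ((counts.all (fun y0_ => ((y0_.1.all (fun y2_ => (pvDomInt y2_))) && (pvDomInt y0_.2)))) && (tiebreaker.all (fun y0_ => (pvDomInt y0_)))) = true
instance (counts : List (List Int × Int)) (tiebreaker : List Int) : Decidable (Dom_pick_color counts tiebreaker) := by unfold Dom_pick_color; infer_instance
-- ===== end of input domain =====

-- B replaces A's flag-tracking scan by three stateless steps (max, tie-count, first-winner lookup); objective: simpler.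


-- ===== PORT A =====
-- the 'for color in counts' loop with its max_found flag and best_color state;
-- 'count = counts[color]' is the dict lookup, 'list(best_color)' at the end
def pcLoopA (rest all : List (List Int × Int)) (mx : Int) (tb : List Int)
    (maxFound : Bool) (best : Option (List Int)) : List Int :=
  match rest with
  | [] => best.getD []          -- list(best_color); best = none (list(None) raises) is unreachable under Pre_
  | (color, _) :: rs =>
      let count := (PySem.Dict.mk all).getD color 0
      if count == mx then
        if maxFound then tb
        else pcLoopA rs all mx tb true (some color)
      else pcLoopA rs all mx tb maxFound best

def pick_color (counts : List (List Int × Int)) (tiebreaker : List Int) : List Int :=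
  match PySem.List.max? (counts.map Prod.snd) (fun v => v) with
  | none => []                  -- max() on empty values raises ValueError; excluded by Pre_
  | some mx => pcLoopA counts counts mx tiebreaker false none

-- ===== PORT B =====
def pick_color_alt (counts : List (List Int × Int)) (tiebreaker : List Int) : List Int :=
  match PySem.List.max? (counts.map Prod.snd) (fun v => v) with
  | none => []                  -- max() on empty values raises ValueError; excluded by Pre_
  | some mx =>
      if 1 < (counts.map Prod.snd).count mx then tiebreaker
      else
        match counts.find? (fun p => p.2 == mx) with
        | some p => p.1
        | none => []            -- unreachable: mx is a value of counts

-- ===== PRECONDITION & SPEC =====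
-- Pre_ excludes the empty dict, on which A's max() raises ValueError, and association lists with
-- duplicate keys, which correspond to no Python dict argument (dict keys are unique).
def Pre_pick_color (counts : List (List Int × Int)) (tiebreaker : List Int) : Prop :=
  counts ≠ [] ∧ (counts.map Prod.fst).Nodup
instance (counts : List (List Int × Int)) (tiebreaker : List Int) : Decidable (Pre_pick_color counts tiebreaker) := by unfold Pre_pick_color; infer_instance
def pvWitness_pick_color : (List (List Int × Int)) × List Int := ([([0, 1], 2), ([3], 1)], [5])
def Spec_pick_color (counts : List (List Int × Int)) (tiebreaker : List Int) (out : List Int) : Prop := out = pick_color_alt counts tiebreaker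
instance (counts : List (List Int × Int)) (tiebreaker : List Int) (out : List Int) : Decidable (Spec_pick_color counts tiebreaker out) := by unfold Spec_pick_color; infer_instance

-- ===== CLAIM (what is proved, stated in full; the proofs are below) =====
def Claim_equal_pick_color : Prop := ∀ (counts : List (List Int × Int)) (tiebreaker : List Int), Dom_pick_color counts tiebreaker → Pre_pick_color counts tiebreaker → Spec_pick_color counts tiebreaker (pick_color counts tiebreaker)

-- ===== LEMMAS AND PROOFS =====

-- with unique keys, the dict lookup of an entry's key returns that entry's value
theorem pc_lookup_mem {counts : List (List Int × Int)} {p : List Int × Int}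
    (hnd : (counts.map Prod.fst).Nodup) (hp : p ∈ counts) :
    (PySem.Dict.mk counts).getD p.1 0 = p.2 := by
  induction counts with
  | nil => cases hp
  | cons a rs ih =>
      obtain ⟨k, v⟩ := a
      simp only [List.map_cons, List.nodup_cons] at hnd
      rcases List.mem_cons.mp hp with h | h
      · subst h
        simp [PySem.Dict.getD, PySem.Dict.get?_mk_cons]
      · have hk : (k == p.1) = false := by
          refine beq_eq_false_iff_ne.mpr ?_
          intro he
          exact hnd.1 (he ▸ List.mem_map_of_mem (f := Prod.fst) h)
        have := ih hnd.2 h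
        simpa [PySem.Dict.getD, PySem.Dict.get?_mk_cons, hk] using this

theorem pcLoopA_found (rest all : List (List Int × Int)) (mx : Int) (tb : List Int) (c : List Int)
    (H : ∀ p ∈ rest, (PySem.Dict.mk all).getD p.1 0 = p.2) :
    pcLoopA rest all mx tb true (some c) =
      if 0 < (rest.map Prod.snd).count mx then tb else c := by
  induction rest with
  | nil => simp [pcLoopA]
  | cons a rs ih =>
      obtain ⟨k, v⟩ := a
      have hv : (PySem.Dict.mk all).getD k 0 = v := H (k, v) (List.mem_cons_self)
      have H' : ∀ p ∈ rs, (PySem.Dict.mk all).getD p.1 0 = p.2 :=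
        fun p hp => H p (List.mem_cons_of_mem _ hp)
      by_cases hm : v = mx
      · subst hm
        simp [pcLoopA, hv]
      · have hb : (v == mx) = false := beq_eq_false_iff_ne.mpr hm
        have hc : List.count mx (v :: rs.map Prod.snd) = List.count mx (rs.map Prod.snd) :=
          List.count_cons_of_ne hm
        simp only [List.map_cons]
        simp only [hc]
        simp [pcLoopA, hv, hb, ih H']

theorem pcLoopA_eq (rest all : List (List Int × Int)) (mx : Int) (tb : List Int)
    (H : ∀ p ∈ rest, (PySem.Dict.mk all).getD p.1 0 = p.2) :
    pcLoopA rest all mx tb false none =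
      if 1 < (rest.map Prod.snd).count mx then tb
      else
        match rest.find? (fun p => p.2 == mx) with
        | some p => p.1
        | none => [] := by
  induction rest with
  | nil => simp [pcLoopA]
  | cons a rs ih =>
      obtain ⟨k, v⟩ := a
      have hv : (PySem.Dict.mk all).getD k 0 = v := H (k, v) (List.mem_cons_self)
      have H' : ∀ p ∈ rs, (PySem.Dict.mk all).getD p.1 0 = p.2 :=
        fun p hp => H p (List.mem_cons_of_mem _ hp)
      by_cases hm : v = mx
      · subst hm
        have hfound := pcLoopA_found rs all v tb k H'
        simp only [pcLoopA, hv, BEq.rfl, if_true, hfound]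
        have hcnt : ((((k, v) :: rs).map Prod.snd).count v) = (rs.map Prod.snd).count v + 1 := by
          simp
        rw [List.find?_cons_of_pos (by simp), hcnt]
        by_cases h0 : 0 < (rs.map Prod.snd).count v
        · have h1 : 1 < (rs.map Prod.snd).count v + 1 := by omega
          simp [h0, h1]
        · have h00 : (rs.map Prod.snd).count v = 0 := Nat.eq_zero_of_not_pos h0
          simp [h00]
      · have hb : (v == mx) = false := beq_eq_false_iff_ne.mpr hm
        have hc : List.count mx (v :: rs.map Prod.snd) = List.count mx (rs.map Prod.snd) :=
          List.count_cons_of_ne hm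
        rw [List.find?_cons_of_neg (by simp [hb])]
        simp [pcLoopA, hv, hb, hc, ih H']

-- ===== VERDICT (by name: the statement is the Claim_ definition above) =====
theorem pick_color_spec : Claim_equal_pick_color := by
  intro counts tiebreaker _ hpre
  obtain ⟨hne, hnd⟩ := hpre
  unfold Spec_pick_color pick_color pick_color_alt
  cases hmx : PySem.List.max? (counts.map Prod.snd) (fun v => v) with
  | none =>
      rfl
  | some mx =>
      exact pcLoopA_eq counts counts mx tiebreaker (fun p hp => pc_lookup_mem hnd hp)
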